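-- pv_equiv track=rewrite | github.com/0xStryK3R/Scaler-DSA-Revision | python/Day-25/CW_3.py | bin_or_sum
-- ===== SOURCE A (Python) =====
-- def subarr_cnt(size):
--     return ((size*(size+1))>>1)
--
-- def bin_or_sum(A, bit_pos):
--     bin_or_sum = subarr_cnt(len(A))
--     zero_cnt = 0
--     for num in A:
--         bin_val = (num>>bit_pos)&1
--         if bin_val:
--             bin_or_sum -= subarr_cnt(zero_cnt)
--             zero_cnt = 0
--         else:
--             zero_cnt += 1
--
--     if zero_cnt:
--         bin_or_sum -= subarr_cnt(zero_cnt)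
--
--     return bin_or_sum
-- ===== SOURCE B (Python) =====
-- def bin_or_sum(A, bit_pos):
--     ans = 0
--     last = 0
--     for i, num in enumerate(A):
--         if (num >> bit_pos) & 1:
--             last = i + 1
--         ans += last
--     return ans
-- ===== Notes on version B (the rewrite author's own statement) =====
-- stated objective: alternative
-- what changed: B counts matching subarrays directly by summing, per position, last_set_index+1 (subarrays ending here that contain a set bit), instead of A's complement scheme of total subarrays minus triangular counts of the zero runs.
import Mathlib
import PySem

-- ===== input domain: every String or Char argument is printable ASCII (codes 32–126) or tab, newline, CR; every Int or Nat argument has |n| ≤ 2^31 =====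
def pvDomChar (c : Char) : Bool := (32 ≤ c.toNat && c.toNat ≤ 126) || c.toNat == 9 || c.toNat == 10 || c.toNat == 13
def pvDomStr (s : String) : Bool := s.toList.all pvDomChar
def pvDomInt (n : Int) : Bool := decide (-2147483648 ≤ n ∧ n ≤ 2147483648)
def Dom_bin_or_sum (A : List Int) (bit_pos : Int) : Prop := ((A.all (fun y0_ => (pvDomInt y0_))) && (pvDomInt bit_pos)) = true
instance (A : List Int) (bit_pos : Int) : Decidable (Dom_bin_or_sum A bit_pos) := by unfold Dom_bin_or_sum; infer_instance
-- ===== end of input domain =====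

-- B counts directly (running `last` = 1 + index of the most recent set bit, summed per position)
-- instead of A's total-minus-zero-runs subtraction; objective: alternative decomposition, same O(n) cost.

-- ===== PORT A =====
def subarr_cnt (size : Int) : Int := (size * (size + 1)) >>> (1 : Nat)

def binOrStepA (bit_pos : Int) (p : Int × Int) (num : Int) : Int × Int :=
  let bin_val := PySem.Int.band (num >>> bit_pos.toNat) 1
  if bin_val ≠ 0 then (p.1 - subarr_cnt p.2, 0) else (p.1, p.2 + 1)

def bin_or_sum (A : List Int) (bit_pos : Int) : Int :=
  if (A.foldl (binOrStepA bit_pos) (subarr_cnt (A.length : Int), 0)).2 ≠ 0 then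
    (A.foldl (binOrStepA bit_pos) (subarr_cnt (A.length : Int), 0)).1
      - subarr_cnt (A.foldl (binOrStepA bit_pos) (subarr_cnt (A.length : Int), 0)).2
  else (A.foldl (binOrStepA bit_pos) (subarr_cnt (A.length : Int), 0)).1

-- ===== PORT B =====
-- state (ans, last, i)
def binOrStepB (bit_pos : Int) (p : Int × Int × Int) (num : Int) : Int × Int × Int :=
  let last := if PySem.Int.band (num >>> bit_pos.toNat) 1 ≠ 0 then p.2.2 + 1 else p.2.1
  (p.1 + last, last, p.2.2 + 1)

def bin_or_sum_alt (A : List Int) (bit_pos : Int) : Int :=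
  (A.foldl (binOrStepB bit_pos) (0, 0, 0)).1

-- ===== PRECONDITION & SPEC =====
-- Pre_ excludes negative bit_pos, on which Python's `num >> bit_pos` raises ValueError.
def Pre_bin_or_sum (A : List Int) (bit_pos : Int) : Prop := 0 ≤ bit_pos
instance (A : List Int) (bit_pos : Int) : Decidable (Pre_bin_or_sum A bit_pos) := by unfold Pre_bin_or_sum; infer_instance
def pvWitness_bin_or_sum : List Int × Int := ([1, 0, 2], 1)

def Spec_bin_or_sum (A : List Int) (bit_pos : Int) (out : Int) : Prop := out = bin_or_sum_alt A bit_pos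
instance (A : List Int) (bit_pos : Int) (out : Int) : Decidable (Spec_bin_or_sum A bit_pos out) := by unfold Spec_bin_or_sum; infer_instance

-- ===== CLAIM (what is proved, stated in full; the proofs are below) =====
def Claim_equal_bin_or_sum : Prop := ∀ (A : List Int) (bit_pos : Int), Dom_bin_or_sum A bit_pos → Pre_bin_or_sum A bit_pos → Spec_bin_or_sum A bit_pos (bin_or_sum A bit_pos)

-- ===== LEMMAS AND PROOFS =====

lemma subarr_cnt_two_mul (m : Int) : 2 * subarr_cnt m = m * (m + 1) := by
  unfold subarr_cnt
  rw [Int.shiftRight_eq_div_pow]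
  have heven : m * (m + 1) % 2 = 0 := Int.even_iff.mp (Int.even_mul_succ_self m)
  norm_num
  omega

lemma subarr_cnt_succ (m : Int) : subarr_cnt (m + 1) = subarr_cnt m + (m + 1) := by
  have h1 := subarr_cnt_two_mul m
  have h2 := subarr_cnt_two_mul (m + 1)
  nlinarith

lemma subarr_cnt_zero : subarr_cnt 0 = 0 := by decide

lemma key (bp : Int) (l : List Int) : ∀ (z ans i c : Int), 0 ≤ z → z ≤ i →
    (let st := l.foldl (binOrStepA bp) (ans + subarr_cnt z + c - subarr_cnt i, z)
     st.1 - subarr_cnt st.2)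
  = (l.foldl (binOrStepB bp) (ans, i - z, i)).1 + c - subarr_cnt (i + (l.length : Int)) := by
  induction l with
  | nil =>
    intro z ans i c hz hzi
    simp
    omega
  | cons num l ih =>
    intro z ans i c hz hzi
    simp only [List.foldl_cons]
    by_cases hb : PySem.Int.band (num >>> bp.toNat) 1 ≠ 0
    · have hA : binOrStepA bp (ans + subarr_cnt z + c - subarr_cnt i, z) num
          = ((ans + (i + 1)) + subarr_cnt 0 + c - subarr_cnt (i + 1), 0) := by
        simp only [binOrStepA, if_pos hb]
        rw [subarr_cnt_succ i, subarr_cnt_zero]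
        simp only [Prod.mk.injEq]
        exact ⟨by ring, trivial⟩
      have hB : binOrStepB bp (ans, i - z, i) num = (ans + (i + 1), (i + 1) - 0, i + 1) := by
        simp only [binOrStepB, if_pos hb]
        norm_num
      rw [hA, hB]
      have := ih 0 (ans + (i + 1)) (i + 1) c le_rfl (by omega)
      simp only at this ⊢
      rw [this]
      have hlen : i + ((num :: l).length : Int) = (i + 1) + (l.length : Int) := by
        simp; omega
      rw [hlen]
    · have hA : binOrStepA bp (ans + subarr_cnt z + c - subarr_cnt i, z) num
          = ((ans + (i - z)) + subarr_cnt (z + 1) + c - subarr_cnt (i + 1), z + 1) := by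
        simp only [binOrStepA, if_neg hb]
        rw [subarr_cnt_succ i, subarr_cnt_succ z]
        simp only [Prod.mk.injEq]
        exact ⟨by ring, trivial⟩
      have hB : binOrStepB bp (ans, i - z, i) num
          = (ans + (i - z), (i + 1) - (z + 1), i + 1) := by
        simp only [binOrStepB, if_neg hb]
        norm_num
      rw [hA, hB]
      have := ih (z + 1) (ans + (i - z)) (i + 1) c (by omega) (by omega)
      simp only at this ⊢
      rw [this]
      have hlen : i + ((num :: l).length : Int) = (i + 1) + (l.length : Int) := by
        simp; omega
      rw [hlen]

-- ===== VERDICT (by name: the statement is the Claim_ definition above) =====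
theorem bin_or_sum_spec : Claim_equal_bin_or_sum := by
  intro A bp _ _
  unfold Spec_bin_or_sum bin_or_sum bin_or_sum_alt
  have h := key bp A 0 0 0 (subarr_cnt (A.length : Int)) le_rfl le_rfl
  simp only [subarr_cnt_zero, sub_zero, add_zero, zero_add, sub_self] at h
  set st := A.foldl (binOrStepA bp) (subarr_cnt (A.length : Int), 0) with hst
  have : st.1 - subarr_cnt st.2 = (A.foldl (binOrStepB bp) (0, 0, 0)).1 := by
    have h' := h
    simpa using h'
  split_ifs with hz
  · exact this
  · simp only [not_not] at hz
    rw [← this, hz, subarr_cnt_zero, sub_zero]
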